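-- pv_equiv track=rewrite | github.com/iacopy/monnalisa | src/drawer.py | symmetrify_shapes
-- ===== SOURCE A (Python) =====
-- def symmetrify_shapes(image_size, symmetry, shapes):
--     total = list(shapes)
--     for element in symmetry:
--         for color, points in shapes:
--             total.append((color, get_symmetry(image_size, element, points)))
--         shapes = list(total)
--     total.sort()
--     return total
--
-- def get_symmetry(image_size, symmetry_element, points):
--     """
--     Return symmetric points against given symmetry element.
--     """
--     width, height = image_size
--     if symmetry_element == 'x':
--         rv = [(width - x, y) for (x, y) in points]
--     elif symmetry_element == 'y':
--         rv = [(x, height - y) for (x, y) in points]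
--     elif symmetry_element == 'o':
--         rv = [(width - x, height - y) for (x, y) in points]
--     elif symmetry_element == '.':
--         return points
--     else:
--         raise Exception('Invalid symmetry_element value: "{}"'.format(symmetry_element))
--     return rv
-- ===== SOURCE B (Python) =====
-- def symmetrify_shapes(image_size, symmetry, shapes):
--     def variants(elements, points):
--         if not elements:
--             return [points]
--         rest = variants(elements[1:], points)
--         return rest + variants(elements[1:], get_symmetry(image_size, elements[0], points))
--
--     result = [(color, v) for color, points in shapes for v in variants(symmetry, points)]
--     result.sort()
--     return result
--
-- def get_symmetry(image_size, symmetry_element, points):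
--     """
--     Return symmetric points against given symmetry element.
--     """
--     width, height = image_size
--     if symmetry_element == 'x':
--         rv = [(width - x, y) for (x, y) in points]
--     elif symmetry_element == 'y':
--         rv = [(x, height - y) for (x, y) in points]
--     elif symmetry_element == 'o':
--         rv = [(width - x, height - y) for (x, y) in points]
--     elif symmetry_element == '.':
--         return points
--     else:
--         raise Exception('Invalid symmetry_element value: "{}"'.format(symmetry_element))
--     return rv
-- ===== Notes on version B (the rewrite author's own statement) =====
-- stated objective: alternative
-- what changed: A grows one global list by repeatedly re-scanning the doubled shapes list once per symmetry element; B instead enumerates, per input shape, all compositions over subsets of the symmetry elements by a direct recursion, concatenates them, and sorts once.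
import Mathlib
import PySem

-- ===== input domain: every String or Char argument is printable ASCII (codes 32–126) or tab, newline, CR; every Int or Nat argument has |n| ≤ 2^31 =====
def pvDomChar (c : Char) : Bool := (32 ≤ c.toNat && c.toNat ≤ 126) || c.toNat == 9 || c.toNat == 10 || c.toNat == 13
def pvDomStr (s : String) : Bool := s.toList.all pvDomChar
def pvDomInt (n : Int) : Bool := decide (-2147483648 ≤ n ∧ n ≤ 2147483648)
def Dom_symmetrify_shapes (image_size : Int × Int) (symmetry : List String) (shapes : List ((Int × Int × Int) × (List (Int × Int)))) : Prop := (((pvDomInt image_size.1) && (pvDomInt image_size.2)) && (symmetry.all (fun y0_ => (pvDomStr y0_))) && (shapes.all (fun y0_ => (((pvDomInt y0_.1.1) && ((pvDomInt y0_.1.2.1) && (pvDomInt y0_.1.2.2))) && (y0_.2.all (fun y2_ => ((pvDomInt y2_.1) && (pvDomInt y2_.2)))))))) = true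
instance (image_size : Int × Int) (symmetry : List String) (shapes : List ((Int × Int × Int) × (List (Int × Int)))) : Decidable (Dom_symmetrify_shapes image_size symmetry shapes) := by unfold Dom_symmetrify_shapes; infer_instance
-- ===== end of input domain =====

-- B replaces A's whole-list doubling loop (total/shapes growing in lockstep) by a per-shape
-- recursive enumeration of all compositions of symmetry-element subsets, then one sort
-- (objective: simpler/alternative decomposition; same result, both end in list.sort()).

-- ===== PORT A =====
-- Python-exact lexicographic sort key for the tuples (color, points): Python compares
-- tuples and lists lexicographically, which is the Lex product / List order below.
def pyKey (s : (Int × Int × Int) × List (Int × Int)) :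
    Lex ((Lex (Int × Lex (Int × Int))) × List (Lex (Int × Int))) :=
  toLex (toLex (s.1.1, toLex (s.1.2.1, s.1.2.2)), s.2.map (fun p => toLex (p.1, p.2)))

-- get_symmetry: the final `else` branch RAISES in Python; those inputs are excluded by
-- Pre_symmetrify_shapes (the port returns `points` there, but nothing is claimed there).
def pyGetSymmetry (image_size : Int × Int) (symmetry_element : String)
    (points : List (Int × Int)) : List (Int × Int) :=
  let width := image_size.1
  let height := image_size.2
  if symmetry_element = "x" then points.map (fun p => (width - p.1, p.2))
  else if symmetry_element = "y" then points.map (fun p => (p.1, height - p.2))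
  else if symmetry_element = "o" then points.map (fun p => (width - p.1, height - p.2))
  else if symmetry_element = "." then points
  else points

def symmetrify_shapes (image_size : Int × Int) (symmetry : List String) (shapes : List ((Int × Int × Int) × (List (Int × Int)))) : List ((Int × Int × Int) × (List (Int × Int))) :=
  -- state = (total, shapes); 'total = list(shapes)' makes both components start equal
  let st := symmetry.foldl
    (fun (st : List ((Int × Int × Int) × (List (Int × Int))) × List ((Int × Int × Int) × (List (Int × Int)))) element =>
      let total := st.2.foldl
        (fun total cp => total ++ [(cp.1, pyGetSymmetry image_size element cp.2)]) st.1
      (total, total))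
    (shapes, shapes)
  PySem.List.sorted st.1 pyKey false

-- ===== PORT B =====
-- variants(elements, points) from Source B: all compositions over subsets of `elements`
def variantsB (image_size : Int × Int) : List String → List (Int × Int) → List (List (Int × Int))
  | [], points => [points]
  | e :: rest, points =>
      variantsB image_size rest points ++
      variantsB image_size rest (pyGetSymmetry image_size e points)

def symmetrify_shapes_alt (image_size : Int × Int) (symmetry : List String) (shapes : List ((Int × Int × Int) × (List (Int × Int)))) : List ((Int × Int × Int) × (List (Int × Int))) :=
  PySem.List.sorted
    (shapes.flatMap (fun cp => (variantsB image_size symmetry cp.2).map (fun v => (cp.1, v))))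
    pyKey false

-- ===== PRECONDITION & SPEC =====
-- Pre_ excludes exactly the inputs on which Python A raises: a nonempty shapes list with a
-- symmetry element outside {'x','y','o','.'} (with shapes == [] the invalid element is never used).
def Pre_symmetrify_shapes (image_size : Int × Int) (symmetry : List String) (shapes : List ((Int × Int × Int) × (List (Int × Int)))) : Prop :=
  shapes = [] ∨ ∀ s ∈ symmetry, s = "x" ∨ s = "y" ∨ s = "o" ∨ s = "."
instance (image_size : Int × Int) (symmetry : List String) (shapes : List ((Int × Int × Int) × (List (Int × Int)))) : Decidable (Pre_symmetrify_shapes image_size symmetry shapes) := by unfold Pre_symmetrify_shapes; infer_instance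
def pvWitness_symmetrify_shapes : (Int × Int) × List String × (List ((Int × Int × Int) × (List (Int × Int)))) :=
  ((8, 8), ["x", "y"], [((1, 2, 3), [(0, 1), (2, 2)])])

def Spec_symmetrify_shapes (image_size : Int × Int) (symmetry : List String) (shapes : List ((Int × Int × Int) × (List (Int × Int)))) (out : List ((Int × Int × Int) × (List (Int × Int)))) : Prop := out = symmetrify_shapes_alt image_size symmetry shapes
instance (image_size : Int × Int) (symmetry : List String) (shapes : List ((Int × Int × Int) × (List (Int × Int)))) (out : List ((Int × Int × Int) × (List (Int × Int)))) : Decidable (Spec_symmetrify_shapes image_size symmetry shapes out) := by unfold Spec_symmetrify_shapes; infer_instance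

-- ===== CLAIM (what is proved, stated in full; the proofs are below) =====
def Claim_equal_symmetrify_shapes : Prop := ∀ (image_size : Int × Int) (symmetry : List String) (shapes : List ((Int × Int × Int) × (List (Int × Int)))), Dom_symmetrify_shapes image_size symmetry shapes → Pre_symmetrify_shapes image_size symmetry shapes → Spec_symmetrify_shapes image_size symmetry shapes (symmetrify_shapes image_size symmetry shapes)

-- ===== LEMMAS AND PROOFS =====

theorem pyKey_injective : Function.Injective pyKey := by
  rintro ⟨⟨a1, a2, a3⟩, la⟩ ⟨⟨b1, b2, b3⟩, lb⟩ h
  simp only [pyKey, toLex_inj, Prod.mk.injEq] at h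
  obtain ⟨⟨h1, h2, h3⟩, h4⟩ := h
  have hla : la = lb :=
    List.map_injective_iff.mpr (fun p q hpq => by
      have := toLex_inj.mp hpq
      exact Prod.ext (congrArg Prod.fst this) (congrArg Prod.snd this)) h4
  simp_all

-- A's accumulated (unsorted) list, as a recursion over the symmetry elements
def totalA (image_size : Int × Int) : List String → List ((Int × Int × Int) × (List (Int × Int))) → List ((Int × Int × Int) × (List (Int × Int)))
  | [], X => X
  | e :: rest, X =>
      totalA image_size rest (X ++ X.map (fun cp => (cp.1, pyGetSymmetry image_size e cp.2)))

theorem loopA_eq (image_size : Int × Int) :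
    ∀ (syms : List String) (X : List ((Int × Int × Int) × (List (Int × Int)))),
      syms.foldl
        (fun (st : List ((Int × Int × Int) × (List (Int × Int))) × List ((Int × Int × Int) × (List (Int × Int)))) element =>
          let total := st.2.foldl
            (fun total cp => total ++ [(cp.1, pyGetSymmetry image_size element cp.2)]) st.1
          (total, total))
        (X, X)
      = (totalA image_size syms X, totalA image_size syms X) := by
  intro syms
  induction syms with
  | nil => intro X; rfl
  | cons e rest ih =>
      intro X
      simp only [List.foldl_cons, totalA]
      rw [PySem.List.foldl_append_singleton_eq_map]
      exact ih _

theorem totalA_perm (image_size : Int × Int) :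
    ∀ (syms : List String) (X : List ((Int × Int × Int) × (List (Int × Int)))),
      (totalA image_size syms X).Perm
        (X.flatMap (fun cp => (variantsB image_size syms cp.2).map (fun v => (cp.1, v)))) := by
  intro syms
  induction syms with
  | nil => intro X; simp [totalA, variantsB]
  | cons e rest ih =>
      intro X
      simp only [totalA, variantsB, List.map_append]
      refine (ih _).trans ?_
      rw [List.flatMap_append]
      have hmap :
          ((X.map (fun cp => (cp.1, pyGetSymmetry image_size e cp.2))).flatMap
            (fun cp => (variantsB image_size rest cp.2).map (fun v => (cp.1, v))))
          = X.flatMap (fun cp =>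
              (variantsB image_size rest (pyGetSymmetry image_size e cp.2)).map (fun v => (cp.1, v))) := by
        rw [List.flatMap_map]
      rw [hmap]
      exact List.flatMap_append_perm X _ _

-- ===== VERDICT (by name: the statement is the Claim_ definition above) =====
theorem symmetrify_shapes_spec : Claim_equal_symmetrify_shapes := by
  intro image_size symmetry shapes _ _
  unfold Spec_symmetrify_shapes symmetrify_shapes symmetrify_shapes_alt
  rw [loopA_eq]
  exact PySem.List.sorted_eq_sorted_of_perm _ _ pyKey pyKey_injective
    (totalA_perm image_size symmetry shapes)
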